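-- pv_equiv track=rewrite | github.com/BarnabasG/Advent-of-Code | 2024/19/19.py | find_path_count
-- ===== SOURCE A (Python) =====
-- from functools import cache
--
-- def find_path_count(towel, stock):
--
--     @cache
--     def dfs_count(index: int) -> bool:
--         if index == len(towel):
--             return True
--
--         count = 0
--         for s in stock:
--             if towel[index:].startswith(s):
--                 count += dfs_count(index + len(s))
--
--         return count
--
--     return dfs_count(0)
-- ===== SOURCE B (Python) =====
-- def find_path_count(towel, stock):
--     # Iterative back-to-front DP table; pieces are bucketed by first character,
--     # so position i only tries the pieces starting with towel[i].
--     by_first = {}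
--     for s in stock:
--         by_first.setdefault(s[0], []).append(s)
--     n = len(towel)
--     ways = [1]  # ways[j - i] = number of ways to tile towel[j:], for j = i..n
--     for i in range(n - 1, -1, -1):
--         total = 0
--         for s in by_first.get(towel[i], []):
--             if towel.startswith(s, i):
--                 total += ways[len(s) - 1]
--         ways = [total] + ways
--     return ways[0]
-- ===== Notes on version B (the rewrite author's own statement) =====
-- stated objective: faster
-- what changed: A's memoized top-down recursion over indices is replaced by an iterative back-to-front DP table whose inner loop only tries the stock pieces bucketed under the current towel character, removing per-call recursion/cache overhead and most failed prefix checks.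
-- outside the precondition, e.g. on find_path_count('a', ['a', '']): A raises RecursionError, B raises IndexError; on find_path_count('', []): A returns True, B returns 1
import Mathlib
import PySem

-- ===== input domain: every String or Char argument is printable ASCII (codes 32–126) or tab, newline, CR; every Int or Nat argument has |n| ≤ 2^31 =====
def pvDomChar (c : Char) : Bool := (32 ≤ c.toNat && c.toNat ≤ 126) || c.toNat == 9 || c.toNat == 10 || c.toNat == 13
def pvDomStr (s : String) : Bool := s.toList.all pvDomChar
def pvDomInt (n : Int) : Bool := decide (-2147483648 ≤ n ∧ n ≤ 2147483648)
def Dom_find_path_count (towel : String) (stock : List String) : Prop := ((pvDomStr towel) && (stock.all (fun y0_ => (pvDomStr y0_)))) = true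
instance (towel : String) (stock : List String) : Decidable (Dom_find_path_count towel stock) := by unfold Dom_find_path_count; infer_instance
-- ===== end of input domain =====

-- B replaces A's memoized top-down recursion by an iterative back-to-front DP
-- table whose inner loop tries only the pieces bucketed under the current
-- towel character (objective: faster, measured).

-- ===== PORT A =====
-- A's dfs_count, transliterated as structural recursion on a fuel counter
-- (the @cache decorator only memoizes; it does not change the value).  Under
-- Pre_ (no empty string in stock) the fuel |towel| + 1 is never exhausted.
def dfsA (t : List Char) (stock : List String) : Nat → Nat → Int
  | 0, _ => 0
  | fuel + 1, index =>
    if index = t.length then 1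
    else
      stock.foldl (fun count s =>
        if PySem.Chars.startswith (t.drop index) s.toList    -- towel[index:].startswith(s)
        then count + dfsA t stock fuel (index + s.toList.length)
        else count) 0

def find_path_count (towel : String) (stock : List String) : Int :=
  dfsA towel.toList stock (towel.toList.length + 1) 0

-- ===== PORT B =====
-- Source B's first loop: by_first.setdefault(s[0], []).append(s).  s[0] is
-- PySem pyGet?; its none case is Python's IndexError (those inputs are
-- excluded by Pre_), where the port leaves the dict unchanged.
def buckets (stock : List String) : PySem.Dict Char (List String) :=
  stock.foldl (fun d s =>
    match PySem.List.pyGet? s.toList (0 : Int) with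
    | some c => d.modify c [] (fun l => l ++ [s])
    | none => d) PySem.Dict.empty

-- inner loop body of Source B: total for position i, given ways = [w_i+1, …, w_n].
-- towel[i] is pyGet? (the loop only produces 0 ≤ i < |towel|, so the none
-- case never fires there); towel.startswith(s, i) for 0 ≤ i is exactly
-- Chars.startswith on the drop; ways[len(s)-1] via pyGetD (ways is never
-- empty, so pyGetD's default never fires).
def altStep (t : List Char) (d : PySem.Dict Char (List String)) (i : Nat) (ways : List Int) : Int :=
  match PySem.List.pyGet? t (i : Int) with
  | some c =>
      (d.getD c []).foldl (fun tot s =>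
        if PySem.Chars.startswith (t.drop i) s.toList
        then tot + PySem.List.pyGetD ways ((s.toList.length : Int) - 1) 0
        else tot) 0
  | none => 0

-- Source B's `for i in range(n-1, -1, -1)` loop: after k iterations (i = n-1 … n-k)
-- `ways` holds the k+1 entries for positions n-k … n.
def altWays (t : List Char) (d : PySem.Dict Char (List String)) (n : Nat) : Nat → List Int
  | 0 => [1]
  | k + 1 => altStep t d (n - (k + 1)) (altWays t d n k) :: altWays t d n k

def find_path_count_alt (towel : String) (stock : List String) : Int :=
  PySem.List.pyGetD
    (altWays towel.toList (buckets stock) towel.toList.length towel.toList.length)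
    0 0

-- ===== PRECONDITION & SPEC =====
-- Pre_ excludes the inputs where A raises (RecursionError: an empty string in
-- stock makes dfs_count(index) call itself) and the empty towel, where A
-- returns the bool True instead of a value of the declared int type (B returns 1).
def Pre_find_path_count (towel : String) (stock : List String) : Prop :=
  towel.toList ≠ [] ∧ ∀ s ∈ stock, s.toList ≠ []
instance (towel : String) (stock : List String) : Decidable (Pre_find_path_count towel stock) := by unfold Pre_find_path_count; infer_instance

def pvWitness_find_path_count : String × List String := ("abcab", ["a", "bc", "ab", "c", "a"])

def Spec_find_path_count (towel : String) (stock : List String) (out : Int) : Prop := out = find_path_count_alt towel stock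
instance (towel : String) (stock : List String) (out : Int) : Decidable (Spec_find_path_count towel stock out) := by unfold Spec_find_path_count; infer_instance

-- ===== CLAIM (what is proved, stated in full; the proofs are below) =====
def Claim_equal_find_path_count : Prop := ∀ (towel : String) (stock : List String), Dom_find_path_count towel stock → Pre_find_path_count towel stock → Spec_find_path_count towel stock (find_path_count towel stock)

-- ===== LEMMAS AND PROOFS =====

-- canonical value of A's dfs at position j (fuel large enough below |towel|+1)
def gA (t : List Char) (stock : List String) (j : Nat) : Int :=
  dfsA t stock (t.length + 1 - j) j

theorem dfs_fuel (t : List Char) (stock : List String)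
    (he : ∀ s ∈ stock, s.toList ≠ []) :
    ∀ (k f1 f2 index : Nat), t.length - index = k → index ≤ t.length →
      k < f1 → k < f2 → dfsA t stock f1 index = dfsA t stock f2 index := by
  intro k
  induction k using Nat.strong_induction_on with
  | _ k IH =>
    intro f1 f2 index hk hin h1 h2
    cases f1 with
    | zero => omega
    | succ a =>
      cases f2 with
      | zero => omega
      | succ b =>
        simp only [dfsA]
        by_cases hend : index = t.length
        · simp [hend]
        · simp only [if_neg hend]
          apply PySem.List.foldl_congr_mem
          intro acc s hs
          by_cases hsw : PySem.Chars.startswith (t.drop index) s.toList = true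
          · simp only [if_pos hsw]
            congr 1
            have hpre : s.toList <+: t.drop index := (PySem.Chars.startswith_iff _ _).mp hsw
            have hlen : s.toList.length ≤ t.length - index := by
              have := hpre.length_le
              simpa [List.length_drop] using this
            have hpos : 0 < s.toList.length := List.length_pos_iff.mpr (he s hs)
            exact IH (t.length - (index + s.toList.length)) (by omega) a b _ rfl (by omega)
              (by omega) (by omega)
          · simp [hsw]

theorem getD_buckets_gen (c : Char) :
    ∀ (stock : List String) (d : PySem.Dict Char (List String)),
      (∀ s ∈ stock, s.toList ≠ []) →
      (stock.foldl (fun d s =>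
        match PySem.List.pyGet? s.toList (0 : Int) with
        | some c => d.modify c [] (fun l => l ++ [s])
        | none => d) d).getD c []
        = d.getD c [] ++ stock.filter (fun s => s.toList.head? == some c) := by
  intro stock
  induction stock with
  | nil => intro d _; simp
  | cons s st IH =>
    intro d he
    obtain ⟨ch, rest, hs⟩ : ∃ ch rest, s.toList = ch :: rest := by
      cases h : s.toList with
      | nil => exact absurd h (he s (List.mem_cons_self))
      | cons a l => exact ⟨a, l, rfl⟩
    have hget : PySem.List.pyGet? s.toList (0 : Int) = some ch := by
      rw [hs]; simp [PySem.List.pyGet?, PySem.List.pyIdx?]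
    simp only [List.foldl_cons, List.filter_cons, hget]
    rw [IH _ (fun x hx => he x (List.mem_cons_of_mem s hx))]
    by_cases hc : ch = c
    · subst hc
      rw [PySem.Dict.getD_modify_self]
      simp [hs]
    · rw [PySem.Dict.getD_modify_of_ne _ _ _ (Ne.symm hc)]
      have : (s.toList.head? == some c) = false := by
        simp [hs, hc]
      simp [this]

theorem getD_buckets (stock : List String) (he : ∀ s ∈ stock, s.toList ≠ []) (c : Char) :
    (buckets stock).getD c [] = stock.filter (fun s => s.toList.head? == some c) := by
  rw [buckets, getD_buckets_gen c stock PySem.Dict.empty he]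
  simp

theorem sum_filter_eq (x : String → Int) (P : String → Bool) :
    ∀ l : List String, (∀ s ∈ l, P s = false → x s = 0) →
      ((l.filter P).map x).sum = (l.map x).sum := by
  intro l
  induction l with
  | nil => intro _; simp
  | cons a l IH =>
    intro h
    have ht := IH (fun s hs => h s (List.mem_cons_of_mem a hs))
    by_cases hp : P a = true
    · simp [hp, ht]
    · have hz : x a = 0 := h a (List.mem_cons_self) (by simpa using hp)
      simp [hp, ht, hz]

theorem altStep_eq (t : List Char) (stock : List String)
    (he : ∀ s ∈ stock, s.toList ≠ []) (i k : Nat) (hik : i + (k + 1) = t.length) :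
    altStep t (buckets stock) i
      ((List.range (k + 1)).map (fun j => gA t stock (t.length - k + j))) = gA t stock i := by
  have hi : i < t.length := by omega
  have hne : ¬ (i = t.length) := by omega
  have hfuel : t.length + 1 - i = k + 2 := by omega
  -- the common per-piece contribution
  have key : ∀ s ∈ stock, PySem.Chars.startswith (t.drop i) s.toList = true →
      PySem.List.pyGetD ((List.range (k + 1)).map (fun j => gA t stock (t.length - k + j)))
        ((s.toList.length : Int) - 1) 0 = gA t stock (i + s.toList.length) := by
    intro s hs hsw
    have hpre : s.toList <+: t.drop i := (PySem.Chars.startswith_iff _ _).mp hsw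
    have hlen : s.toList.length ≤ k + 1 := by
      have h2 := hpre.length_le
      rw [List.length_drop] at h2
      omega
    have hpos : 0 < s.toList.length := List.length_pos_iff.mpr (he s hs)
    have hcast : ((s.toList.length : Int) - 1) = ((s.toList.length - 1 : Nat) : Int) := by omega
    rw [hcast, PySem.List.pyGetD_natCast]
    have hidx : s.toList.length - 1 < k + 1 := by omega
    rw [List.getD_eq_getElem _ _ (by simpa using hidx)]
    simp only [List.getElem_map, List.getElem_range]
    congr 1
    omega
  -- a matching piece starts with towel[i]
  have hmatch : ∀ s ∈ stock, PySem.Chars.startswith (t.drop i) s.toList = true →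
      (s.toList.head? == some t[i]) = true := by
    intro s hs hsw
    have hpre : s.toList <+: t.drop i := (PySem.Chars.startswith_iff _ _).mp hsw
    obtain ⟨u, hu⟩ := hpre
    have hh : (t.drop i).head? = some t[i] := by
      rw [List.head?_drop]
      exact List.getElem?_eq_getElem hi
    rw [← hu] at hh
    obtain ⟨ch, rest, hsl⟩ : ∃ ch rest, s.toList = ch :: rest := by
      cases h : s.toList with
      | nil => exact absurd h (he s hs)
      | cons a l => exact ⟨a, l, rfl⟩
    rw [hsl] at hh ⊢
    simp only [List.cons_append, List.head?_cons, Option.some.injEq] at hh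
    simp [hh]
  -- unfold A's one step at position i
  have hA : gA t stock i = stock.foldl (fun c s =>
      c + (if PySem.Chars.startswith (t.drop i) s.toList = true
           then gA t stock (i + s.toList.length) else 0)) 0 := by
    rw [gA, hfuel]
    simp only [dfsA, if_neg hne]
    apply PySem.List.foldl_congr_mem
    intro acc s hs
    by_cases hsw : PySem.Chars.startswith (t.drop i) s.toList = true
    · rw [if_pos hsw, if_pos hsw]
      congr 1
      have hpre : s.toList <+: t.drop i := (PySem.Chars.startswith_iff _ _).mp hsw
      have hlen : s.toList.length ≤ k + 1 := by
        have h2 := hpre.length_le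
        rw [List.length_drop] at h2
        omega
      have hpos : 0 < s.toList.length := List.length_pos_iff.mpr (he s hs)
      exact dfs_fuel t stock he (t.length - (i + s.toList.length)) (k + 1)
        (t.length + 1 - (i + s.toList.length)) (i + s.toList.length) rfl (by omega)
        (by omega) (by omega)
    · simp [hsw]
  rw [hA]
  -- B's side: the bucket of towel[i] is the matching-capable slice of stock
  have hit : PySem.List.pyGet? t (i : Int) = some t[i] := by
    simp only [PySem.List.pyGet?, PySem.List.pyIdx?, Nat.cast_nonneg, reduceIte, Nat.cast_lt, hi,
      Int.toNat_natCast, Option.bind_some, getElem?_pos]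
  rw [altStep, hit]
  simp only []
  rw [getD_buckets stock he t[i]]
  have hB : (stock.filter (fun s => s.toList.head? == some t[i])).foldl (fun tot s =>
        if PySem.Chars.startswith (t.drop i) s.toList = true
        then tot + PySem.List.pyGetD ((List.range (k + 1)).map (fun j => gA t stock (t.length - k + j)))
          ((s.toList.length : Int) - 1) 0
        else tot) 0
      = (stock.filter (fun s => s.toList.head? == some t[i])).foldl (fun tot s =>
          tot + (if PySem.Chars.startswith (t.drop i) s.toList = true
                 then gA t stock (i + s.toList.length) else 0)) 0 := by
    apply PySem.List.foldl_congr_mem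
    intro acc s hs
    have hs' : s ∈ stock := List.mem_of_mem_filter hs
    by_cases hsw : PySem.Chars.startswith (t.drop i) s.toList = true
    · rw [if_pos hsw, if_pos hsw, key s hs' hsw]
    · simp [hsw]
  rw [hB]
  rw [PySem.List.foldl_add, PySem.List.foldl_add]
  simp only [zero_add]
  exact sum_filter_eq _ _ stock
    (fun s hs hp => by
      by_cases hsw : PySem.Chars.startswith (t.drop i) s.toList = true
      · exact absurd (hmatch s hs hsw) (by simp [hp])
      · simp [hsw])

theorem altWays_eq (t : List Char) (stock : List String)
    (he : ∀ s ∈ stock, s.toList ≠ []) :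
    ∀ k, k ≤ t.length →
      altWays t (buckets stock) t.length k =
        (List.range (k + 1)).map (fun j => gA t stock (t.length - k + j)) := by
  intro k
  induction k with
  | zero =>
    intro _
    have h1 : gA t stock t.length = 1 := by simp [gA, dfsA]
    simp [altWays, h1]
  | succ k IH =>
    intro hk
    have hk' : k ≤ t.length := Nat.le_of_succ_le hk
    have htail : (List.range (k + 1 + 1)).map (fun j => gA t stock (t.length - (k + 1) + j))
        = gA t stock (t.length - (k + 1)) ::
          (List.range (k + 1)).map (fun j => gA t stock (t.length - k + j)) := by
      rw [List.range_succ_eq_map]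
      simp only [List.map_cons, List.map_map]
      refine congrArg₂ List.cons (by norm_num) ?_
      apply List.map_congr_left
      intro j _
      simp only [Function.comp_apply]
      congr 1
      omega
    rw [altWays, IH hk', htail, altStep_eq t stock he (t.length - (k + 1)) k (by omega)]

-- ===== VERDICT (by name: the statement is the Claim_ definition above) =====
theorem find_path_count_spec : Claim_equal_find_path_count := by
  intro towel stock _ hpre
  unfold Spec_find_path_count find_path_count find_path_count_alt
  have he : ∀ s ∈ stock, s.toList ≠ [] := hpre.2
  rw [altWays_eq towel.toList stock he towel.toList.length le_rfl,
    List.range_succ_eq_map]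
  simp only [List.map_cons, PySem.List.pyGetD_zero_cons]
  show dfsA towel.toList stock (towel.toList.length + 1) 0 =
    gA towel.toList stock (towel.toList.length - towel.toList.length + 0)
  rw [gA]
  congr 1 <;> omega
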